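-- pv_equiv track=rewrite | github.com/maciejpfutzner/advent_of_code_2022 | day8/day8.py | visible_rows
-- ===== SOURCE A (Python) =====
-- def visible_left(row):
--     n = len(row)
--     visible = [0]*n
--     maxh = -1
--     for i in range (n):
--         if row [i] > maxh:
--             maxh = row[i]
--             visible[i] = 1
--     return visible
--
-- def visible_rows(trees):
--     visibles = []
--     for i, row in enumerate(trees):
--         visl = visible_left(row)
--         visr = visible_left(row[::-1])[::-1]
--         vis = [vl or vr for vl,vr in zip(visl, visr)]
--         visibles.append(vis)
--     return visibles
-- ===== SOURCE B (Python) =====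
-- def visible_rows(trees):
--     return [[1 if h > max([-1] + row[:i]) or h > max([-1] + row[i + 1:]) else 0
--              for i, h in enumerate(row)]
--             for row in trees]
-- ===== Notes on version B (the rewrite author's own statement) =====
-- stated objective: simpler
-- what changed: Replaces the stateful visible_left helper (two directional running-max scans with index writes and two reversals) by a single stateless comprehension that, for each position, compares the height directly against the maxima of the slices before and after it.
import Mathlib
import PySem

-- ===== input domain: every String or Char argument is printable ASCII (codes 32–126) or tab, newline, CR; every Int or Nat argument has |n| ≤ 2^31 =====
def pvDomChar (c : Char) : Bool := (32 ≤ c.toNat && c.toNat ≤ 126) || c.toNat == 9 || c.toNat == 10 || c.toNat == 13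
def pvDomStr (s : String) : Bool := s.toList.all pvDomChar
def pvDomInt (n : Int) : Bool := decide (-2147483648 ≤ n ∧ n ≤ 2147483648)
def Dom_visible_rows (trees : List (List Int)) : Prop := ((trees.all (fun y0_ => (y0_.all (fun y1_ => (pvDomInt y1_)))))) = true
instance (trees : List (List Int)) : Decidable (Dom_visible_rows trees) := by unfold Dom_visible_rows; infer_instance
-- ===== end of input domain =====

-- B drops A's stateful visible_left helper (two directional running-max scans with index
-- writes and two reversals) in favour of one stateless comprehension that compares each
-- height against the maxima of the slices before and after it; simpler, not faster.

-- ===== PORT A =====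
-- visible_left: preallocated 0-array, loop over range(n) writing 1 where a new max is seen
def visibleLeft (row : List Int) : List Int :=
  ((PySem.List.pyRange 0 (row.length : Int) 1).foldl
    (fun (st : List Int × Int) i =>
      if PySem.List.pyGetD row i 0 > st.2 then
        (st.1.set i.toNat 1, PySem.List.pyGetD row i 0)
      else st)
    (List.replicate row.length 0, -1)).1

def visible_rows (trees : List (List Int)) : List (List Int) :=
  trees.foldl
    (fun visibles row =>
      let visl := visibleLeft row
      -- row[::-1] is reversal
      let visr := (visibleLeft row.reverse).reverse
      -- 'vl or vr': Python or returns vl if truthy, else vr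
      let vis := List.zipWith (fun vl vr => if vl ≠ 0 then vl else vr) visl visr
      visibles ++ [vis])
    []

-- ===== PORT B =====
-- max([-1] + xs) (nonempty Python max, PySem.List.max?_id_cons) is the fold of max over xs from -1
def visible_rows_alt (trees : List (List Int)) : List (List Int) :=
  trees.map (fun row =>
    (PySem.List.enumerate row 0).map (fun p =>
      if p.2 > (PySem.List.slice row none (some p.1)).foldl max (-1) ∨
         p.2 > (PySem.List.slice row (some (p.1 + 1)) none).foldl max (-1)
      then (1 : Int) else 0))

-- ===== PRECONDITION & SPEC =====
def Spec_visible_rows (trees : List (List Int)) (out : List (List Int)) : Prop := out = visible_rows_alt trees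
instance (trees : List (List Int)) (out : List (List Int)) : Decidable (Spec_visible_rows trees out) := by unfold Spec_visible_rows; infer_instance

-- ===== CLAIM (what is proved, stated in full; the proofs are below) =====
def Claim_equal_visible_rows : Prop := ∀ (trees : List (List Int)), Dom_visible_rows trees → Spec_visible_rows trees (visible_rows trees)

-- ===== LEMMAS AND PROOFS =====

-- reference form of a single left-to-right scan
def mark (m : Int) : List Int → List Int
  | [] => []
  | h :: t => (if h > m then (1 : Int) else 0) :: mark (max m h) t

theorem mark_length (m : Int) (l : List Int) : (mark m l).length = l.length := by
  induction l generalizing m with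
  | nil => rfl
  | cons h t ih => simp [mark, ih]

-- shifting all indices by one acts on the tail of the scanned list and of the visible array
theorem foldl_step_shift (h v0 : Int) (t : List Int) (l : List Int) (hl : ∀ i ∈ l, 0 ≤ i)
    (vis : List Int) (m : Int) :
    (l.map (· + 1)).foldl
      (fun (st : List Int × Int) i =>
        if PySem.List.pyGetD (h :: t) i 0 > st.2 then
          (st.1.set i.toNat 1, PySem.List.pyGetD (h :: t) i 0)
        else st) (v0 :: vis, m)
    = (fun (p : List Int × Int) => (v0 :: p.1, p.2))
        (l.foldl
          (fun (st : List Int × Int) i =>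
            if PySem.List.pyGetD t i 0 > st.2 then
              (st.1.set i.toNat 1, PySem.List.pyGetD t i 0)
            else st) (vis, m)) := by
  induction l generalizing vis m with
  | nil => rfl
  | cons a l ih =>
    have ha : 0 ≤ a := hl a (by simp)
    have hl' : ∀ i ∈ l, (0:Int) ≤ i := fun i hi => hl i (by simp [hi])
    have hget : PySem.List.pyGetD (h :: t) (a + 1) 0 = PySem.List.pyGetD t a 0 := by
      rw [PySem.List.pyGetD_of_nonneg _ _ (by omega), PySem.List.pyGetD_of_nonneg _ _ ha]
      have h1 : (a + 1).toNat = a.toNat + 1 := by omega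
      rw [h1, List.getD_cons_succ]
    have hset : (a + 1).toNat = a.toNat + 1 := by omega
    simp only [List.map_cons, List.foldl_cons, hget, hset]
    by_cases hb : PySem.List.pyGetD t a 0 > m
    · simp only [hb, if_pos, List.set_cons_succ]
      exact ih hl' (vis.set a.toNat 1) (PySem.List.pyGetD t a 0)
    · simp only [hb, if_neg, not_false_iff]
      exact ih hl' vis m

theorem visibleLeft_aux (row : List Int) (m : Int) :
    ((PySem.List.pyRange 0 (row.length : Int) 1).foldl
      (fun (st : List Int × Int) i =>
        if PySem.List.pyGetD row i 0 > st.2 then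
          (st.1.set i.toNat 1, PySem.List.pyGetD row i 0)
        else st)
      (List.replicate row.length 0, m)).1 = mark m row := by
  induction row generalizing m with
  | nil => simp [PySem.List.pyRange_one_eq_nil, mark]
  | cons h t ih =>
    have hcons : PySem.List.pyRange 0 ((h :: t).length : Int) 1
        = 0 :: PySem.List.pyRange 1 ((h :: t).length : Int) 1 := by
      exact PySem.List.pyRange_one_cons (by simp)
    have hshift : PySem.List.pyRange 1 ((h :: t).length : Int) 1
        = (PySem.List.pyRange 0 (t.length : Int) 1).map (· + 1) := by
      rw [PySem.List.pyRange_one, PySem.List.pyRange_one]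
      simp [List.map_map]
      intro k hk
      omega
    have hget0 : PySem.List.pyGetD (h :: t) 0 0 = h := by
      rw [PySem.List.pyGetD_of_nonneg _ _ (by omega)]; rfl
    have hrep : List.replicate (h :: t).length (0 : Int) = 0 :: List.replicate t.length 0 := by
      simp [List.replicate_succ]
    have hmem : ∀ i ∈ PySem.List.pyRange 0 (t.length : Int) 1, (0:Int) ≤ i := by
      intro i hi
      exact (PySem.List.mem_pyRange_one.mp hi).1
    rw [hcons, hshift, hrep]
    simp only [List.foldl_cons, hget0]
    by_cases hb : h > m
    · simp only [hb, if_pos]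
      have h0 : (0 : Int).toNat = 0 := rfl
      rw [h0, List.set_cons_zero, foldl_step_shift h 1 t _ hmem]
      simp only [mark, hb, if_pos, ih, max_eq_right (le_of_lt hb)]
    · simp only [hb, if_neg, not_false_iff]
      rw [foldl_step_shift h 0 t _ hmem]
      simp only [mark, hb, if_neg, not_false_iff, ih, max_eq_left (not_lt.mp hb)]

theorem visibleLeft_eq_mark (row : List Int) : visibleLeft row = mark (-1) row :=
  visibleLeft_aux row (-1)

-- pulling an element out of a max-fold accumulator
theorem foldl_max_pull (t : List Int) (d h : Int) :
    t.foldl max (max d h) = max (t.foldl max d) h := by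
  induction t generalizing d with
  | nil => rfl
  | cons x t ih =>
    simp only [List.foldl_cons]
    rw [show max (max d h) x = max (max d x) h by
      simp only [max_comm, max_left_comm]]
    exact ih (max d x)

theorem foldl_max_reverse (l : List Int) (d : Int) :
    l.reverse.foldl max d = l.foldl max d := by
  induction l generalizing d with
  | nil => rfl
  | cons h t ih =>
    simp only [List.reverse_cons, List.foldl_append, List.foldl_cons, List.foldl_nil,
      List.foldl_cons]
    rw [ih d, ← foldl_max_pull]

-- the k-th entry of a scan is decided by the max of the first k elements
theorem mark_getElem (l : List Int) (m : Int) (k : Nat) (hk : k < l.length) :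
    (mark m l)[k]'(by rw [mark_length]; exact hk)
      = if l[k] > (l.take k).foldl max m then (1 : Int) else 0 := by
  induction l generalizing m k with
  | nil => exact absurd hk (by simp)
  | cons h t ih =>
    cases k with
    | zero => simp [mark]
    | succ k =>
      simp only [mark, List.getElem_cons_succ, List.take_succ_cons, List.foldl_cons]
      exact ih (max m h) k (by simpa using hk)

-- ===== statements relating the two row computations =====

theorem row_eq (row : List Int) :
    List.zipWith (fun vl vr => if vl ≠ 0 then vl else vr)
      (visibleLeft row) ((visibleLeft row.reverse).reverse)
    = (PySem.List.enumerate row 0).map (fun p =>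
        if p.2 > (PySem.List.slice row none (some p.1)).foldl max (-1) ∨
           p.2 > (PySem.List.slice row (some (p.1 + 1)) none).foldl max (-1)
        then (1 : Int) else 0) := by
  rw [visibleLeft_eq_mark, visibleLeft_eq_mark]
  apply List.ext_getElem
  · simp [mark_length, PySem.List.length_enumerate]
  intro k h1 h2
  have hk : k < row.length := by
    simpa [PySem.List.length_enumerate] using h2
  have hlen : (mark (-1) row.reverse).length = row.length := by
    simp [mark_length]
  rw [List.getElem_zipWith, List.getElem_map, PySem.List.getElem_enumerate]
  have hrev : ((mark (-1) row.reverse).reverse)[k]'(by simpa [hlen] using hk)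
      = if row[k] > (row.drop (k + 1)).foldl max (-1) then (1 : Int) else 0 := by
    rw [List.getElem_reverse]
    rw [mark_getElem row.reverse (-1) _ (by simp [hlen]; omega)]
    congr 1
    have e1 : row.reverse[(mark (-1) row.reverse).length - 1 - k]'(by simp [hlen]; omega)
        = row[k] := by
      rw [List.getElem_reverse]
      congr 1
      simp [hlen]; omega
    have e2 : row.reverse.take ((mark (-1) row.reverse).length - 1 - k)
        = (row.drop (k + 1)).reverse := by
      rw [List.take_reverse, List.reverse_inj]
      congr 1
      simp [hlen]; omega
    rw [e1, e2, foldl_max_reverse]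
  rw [mark_getElem row (-1) k hk, hrev]
  have hs1 : PySem.List.slice row none (some ((0 : Int) + k)) = row.take k := by
    rw [show ((0:Int) + k) = (k : Int) by omega, PySem.List.slice_to_natCast]
  have hs2 : PySem.List.slice row (some ((0 : Int) + k + 1)) none = row.drop (k + 1) := by
    rw [show ((0:Int) + k + 1) = ((k + 1 : Nat) : Int) by omega, PySem.List.slice_from_natCast]
  rw [hs1, hs2]
  by_cases hp : row[k] > (row.take k).foldl max (-1) <;>
    by_cases hq : row[k] > (row.drop (k + 1)).foldl max (-1) <;>
    simp [hp, hq]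

-- ===== VERDICT (by name: the statement is the Claim_ definition above) =====
theorem visible_rows_spec : Claim_equal_visible_rows := by
  intro trees _
  unfold Spec_visible_rows visible_rows visible_rows_alt
  rw [PySem.List.foldl_append_singleton_eq_map]
  simp only [List.nil_append]
  exact List.map_congr_left (fun row _ => row_eq row)
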